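-- pv_equiv track=rewrite | github.com/manas-17045/LeetcodeSolutions | Leetcode 3001-3100/3030/3030.py | resultGrid
-- ===== SOURCE A (Python) =====
-- def resultGrid(image: list[list[int]], threshold: int) -> list[list[int]]:
--     """
--     Calculates the resulting grid where each cell is the average of its 3x3 region if it's a valid region,
--     otherwise, it retains its original value.
--     :param image: The input 2D grid of integers.
--     :param threshold: The maximum allowed difference between adjacent cells in a valid region.
--     :return: The modified 2D grid.
--     """
--     m = len(image)
--     n = len(image[0])
--     regionSums = [[0] * n for _ in range(m)]
--     regionCounts = [[0] * n for _ in range(m)]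
--
--     for i in range(m - 2):
--         for j in range(n - 2):
--             isValid = True
--             for r in range(i, i + 3):
--                 for c in range(j, j + 2):
--                     if abs(image[r][c] - image[r][c + 1]) > threshold:
--                         isValid = False
--                         break
--                 if not isValid:
--                     break
--
--             if isValid:
--                 for c in range(j, j + 3):
--                     for r in range(i, i + 2):
--                         if abs(image[r][c] - image[r + 1][c]) > threshold:
--                             isValid = False
--                             break
--                     if not isValid:
--                         break
--
--             if isValid:
--                 subGridSum = 0
--                 for r in range(i, i + 3):
--                     for c in range(j, j + 3):
--                         subGridSum += image[r][c]
--
--                 average = subGridSum // 9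
--
--                 for r in range(i, i + 3):
--                     for c in range(j, j + 3):
--                         regionSums[r][c] += average
--                         regionCounts[r][c] += 1
--
--     result = [[0] * n for _ in range(m)]
--     for i in range(m):
--         for j in range(n):
--             if regionCounts[i][j] == 0:
--                 result[i][j] = image[i][j]
--             else:
--                 result[i][j] = regionSums[i][j] // regionCounts[i][j]
--
--     return result
-- ===== SOURCE B (Python) =====
-- def resultGrid(image: list[list[int]], threshold: int) -> list[list[int]]:
--     m, n = len(image), len(image[0])
--
--     def valid(i, j):
--         return all(abs(image[r][c] - image[r][c + 1]) <= threshold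
--                    for r in range(i, i + 3) for c in range(j, j + 2)) and \
--                all(abs(image[r][c] - image[r + 1][c]) <= threshold
--                    for r in range(i, i + 2) for c in range(j, j + 3))
--
--     def avg(i, j):
--         return sum(image[r][c] for r in range(i, i + 3) for c in range(j, j + 3)) // 9
--
--     result = []
--     for i in range(m):
--         row = []
--         for j in range(n):
--             cov = [avg(wi, wj)
--                    for wi in range(max(i - 2, 0), min(i, m - 3) + 1)
--                    for wj in range(max(j - 2, 0), min(j, n - 3) + 1)
--                    if valid(wi, wj)]
--             row.append(sum(cov) // len(cov) if cov else image[i][j])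
--         result.append(row)
--     return result
-- ===== Notes on version B (the rewrite author's own statement) =====
-- stated objective: alternative
-- what changed: B replaces A's mutable regionSums/regionCounts scatter accumulation over windows with a per-cell gather: each output cell directly collects the averages of the valid 3x3 windows covering it and divides once, with no intermediate matrices.
import Mathlib
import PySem

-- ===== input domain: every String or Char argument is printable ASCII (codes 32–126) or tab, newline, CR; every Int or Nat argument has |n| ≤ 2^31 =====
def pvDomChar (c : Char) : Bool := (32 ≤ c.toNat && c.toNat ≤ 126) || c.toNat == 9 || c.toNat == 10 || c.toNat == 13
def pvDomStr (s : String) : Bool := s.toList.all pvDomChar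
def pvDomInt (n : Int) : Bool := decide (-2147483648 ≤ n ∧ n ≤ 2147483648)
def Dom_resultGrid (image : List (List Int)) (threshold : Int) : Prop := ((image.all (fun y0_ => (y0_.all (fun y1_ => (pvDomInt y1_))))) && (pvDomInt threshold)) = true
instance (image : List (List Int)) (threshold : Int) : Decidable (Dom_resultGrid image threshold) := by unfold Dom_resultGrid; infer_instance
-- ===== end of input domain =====

-- B replaces A's mutable regionSums/regionCounts scatter accumulation with a per-cell gather
-- of the averages of the valid 3x3 windows covering the cell (objective: alternative, same cost).
-- gAt/indexing is exact for the in-range indices Pre_ guarantees.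

-- ===== PORT A =====
-- shared 2D read helper: image[r][c] (indices are nonneg and in range under Pre_)
def gAt (g : List (List Int)) (r c : Int) : Int :=
  PySem.List.pyGetD (PySem.List.pyGetD g r []) c 0

-- A-side helper: g[r][c] = v (in range under Pre_)
def mset (g : List (List Int)) (r c : Int) (v : Int) : List (List Int) :=
  PySem.List.pySetD g r (PySem.List.pySetD (PySem.List.pyGetD g r []) c v)

-- A's loop body for one window (i, j) = w, acting on the state (regionSums, regionCounts)
def aStep (image : List (List Int)) (threshold : Int)
    (st : List (List Int) × List (List Int)) (w : Int × Int) :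
    List (List Int) × List (List Int) :=
  let i := w.1
  let j := w.2
  let isValid := (PySem.List.pyRange i (i+3) 1).all (fun r =>
    (PySem.List.pyRange j (j+2) 1).all (fun c =>
      decide (|gAt image r c - gAt image r (c+1)| ≤ threshold)))
  let isValid := isValid && (PySem.List.pyRange j (j+3) 1).all (fun c =>
    (PySem.List.pyRange i (i+2) 1).all (fun r =>
      decide (|gAt image r c - gAt image (r+1) c| ≤ threshold)))
  if isValid then
    let subGridSum := (PySem.List.pyRange i (i+3) 1).foldl (fun acc r =>
      (PySem.List.pyRange j (j+3) 1).foldl (fun acc c => acc + gAt image r c) acc) 0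
    let average := PySem.Int.floordiv subGridSum 9
    (PySem.List.pyRange i (i+3) 1).foldl (fun st r =>
      (PySem.List.pyRange j (j+3) 1).foldl (fun st c =>
        (mset st.1 r c (gAt st.1 r c + average),
         mset st.2 r c (gAt st.2 r c + 1))) st) st
  else st

def resultGrid (image : List (List Int)) (threshold : Int) : List (List Int) :=
  let m : Int := PySem.List.len image
  let n : Int := PySem.List.len (PySem.List.pyGetD image 0 [])
  let zeros : List (List Int) := List.replicate m.toNat (List.replicate n.toNat 0)
  let st := (PySem.List.pyRange 0 (m-2) 1).foldl (fun st i =>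
    (PySem.List.pyRange 0 (n-2) 1).foldl (fun st j => aStep image threshold st (i, j)) st)
    (zeros, zeros)
  (PySem.List.pyRange 0 m 1).map (fun i =>
    (PySem.List.pyRange 0 n 1).map (fun j =>
      if gAt st.2 i j = 0 then gAt image i j
      else PySem.Int.floordiv (gAt st.1 i j) (gAt st.2 i j)))

-- ===== PORT B =====
-- B's valid(i, j): all horizontal and vertical neighbour differences inside the window are ≤ threshold
def bValid (image : List (List Int)) (threshold : Int) (i j : Int) : Bool :=
  (((PySem.List.pyRange i (i+3) 1).flatMap (fun r =>
      (PySem.List.pyRange j (j+2) 1).map (fun c => (r, c)))).all (fun rc =>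
        decide (|gAt image rc.1 rc.2 - gAt image rc.1 (rc.2+1)| ≤ threshold))) &&
  (((PySem.List.pyRange i (i+2) 1).flatMap (fun r =>
      (PySem.List.pyRange j (j+3) 1).map (fun c => (r, c)))).all (fun rc =>
        decide (|gAt image rc.1 rc.2 - gAt image (rc.1+1) rc.2| ≤ threshold)))

-- B's avg(i, j)
def bAvg (image : List (List Int)) (i j : Int) : Int :=
  PySem.Int.floordiv
    (((PySem.List.pyRange i (i+3) 1).flatMap (fun r =>
        (PySem.List.pyRange j (j+3) 1).map (fun c => gAt image r c))).foldl (· + ·) 0) 9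

def resultGrid_alt (image : List (List Int)) (threshold : Int) : List (List Int) :=
  let m : Int := PySem.List.len image
  let n : Int := PySem.List.len (PySem.List.pyGetD image 0 [])
  (PySem.List.pyRange 0 m 1).map (fun i =>
    (PySem.List.pyRange 0 n 1).map (fun j =>
      let cov : List Int :=
        (PySem.List.pyRange (max (i - 2) 0) (min i (m - 3) + 1) 1).flatMap (fun wi =>
          ((PySem.List.pyRange (max (j - 2) 0) (min j (n - 3) + 1) 1).filter
              (fun wj => bValid image threshold wi wj)).map
            (fun wj => bAvg image wi wj))
      if cov.isEmpty then gAt image i j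
      else PySem.Int.floordiv (cov.foldl (· + ·) 0) (PySem.List.len cov)))

-- ===== PRECONDITION & SPEC =====
-- Pre_ excludes exactly the inputs where the Python A raises an IndexError: the empty image
-- (A reads image[0]) and grids with some row shorter than row 0 (A reads column indices < len(image[0])
-- in every row).  Longer rows are allowed: A never reads past column len(image[0]) - 1.
def Pre_resultGrid (image : List (List Int)) (threshold : Int) : Prop :=
  image ≠ [] ∧ ∀ row ∈ image, (image.headD []).length ≤ row.length
instance (image : List (List Int)) (threshold : Int) : Decidable (Pre_resultGrid image threshold) := by
  unfold Pre_resultGrid; infer_instance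
def pvWitness_resultGrid : List (List Int) × Int := ([[1, 2, 3], [4, 5, 6], [7, 8, 9]], 5)

def Spec_resultGrid (image : List (List Int)) (threshold : Int) (out : List (List Int)) : Prop := out = resultGrid_alt image threshold
instance (image : List (List Int)) (threshold : Int) (out : List (List Int)) : Decidable (Spec_resultGrid image threshold out) := by unfold Spec_resultGrid; infer_instance

-- ===== CLAIM (what is proved, stated in full; the proofs are below) =====
def Claim_equal_resultGrid : Prop := ∀ (image : List (List Int)) (threshold : Int), Dom_resultGrid image threshold → Pre_resultGrid image threshold → Spec_resultGrid image threshold (resultGrid image threshold)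

-- ===== LEMMAS AND PROOFS =====

-- shape of an accumulator matrix: M rows, each of length N
def Shape (M N : Nat) (g : List (List Int)) : Prop :=
  g.length = M ∧ ∀ row ∈ g, row.length = N

-- window w covers cell (i, j)
def covB (w : Int × Int) (i j : Int) : Bool :=
  decide (w.1 ≤ i) && decide (i ≤ w.1 + 2) && decide (w.2 ≤ j) && decide (j ≤ w.2 + 2)

-- the averages of the valid windows (among W, in order) covering cell (i, j)
def covL (image : List (List Int)) (threshold : Int) (W : List (Int × Int)) (i j : Int) : List Int :=
  (W.filter (fun w => bValid image threshold w.1 w.2 && covB w i j)).map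
    (fun w => bAvg image w.1 w.2)

-- the 9 cells of window w, in A's update order
def cells (w : Int × Int) : List (Int × Int) :=
  (PySem.List.pyRange w.1 (w.1+3) 1).flatMap (fun r =>
    (PySem.List.pyRange w.2 (w.2+3) 1).map (fun c => (r, c)))

-- one cell update of A's accumulation
def updCell (avg : Int) (st : List (List Int) × List (List Int)) (rc : Int × Int) :
    List (List Int) × List (List Int) :=
  (mset st.1 rc.1 rc.2 (gAt st.1 rc.1 rc.2 + avg),
   mset st.2 rc.1 rc.2 (gAt st.2 rc.1 rc.2 + 1))

theorem filter_flatMap {α β : Type} (l : List α) (f : α → List β) (p : β → Bool) :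
    (l.flatMap f).filter p = l.flatMap (fun a => (f a).filter p) := by
  induction l with
  | nil => rfl
  | cons x t ih => simp [List.flatMap_cons, List.filter_append, ih]
theorem pyRange_filter_band (a b lo hi : Int) :
    (PySem.List.pyRange a b 1).filter (fun x => decide (lo ≤ x) && decide (x ≤ hi))
      = PySem.List.pyRange (max lo a) (min hi (b - 1) + 1) 1 := by
  by_cases hab : b ≤ a
  · rw [PySem.List.pyRange_one_eq_nil hab, PySem.List.pyRange_one_eq_nil (by omega)]
    rfl
  · have h : a < b := by omega
    have key : ∀ k : Nat, ∀ a : Int, b - a = k →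
        (PySem.List.pyRange a b 1).filter (fun x => decide (lo ≤ x) && decide (x ≤ hi))
          = PySem.List.pyRange (max lo a) (min hi (b - 1) + 1) 1 := by
      intro k
      induction k with
      | zero => intro a ha
                rw [PySem.List.pyRange_one_eq_nil (by omega), PySem.List.pyRange_one_eq_nil (by omega)]; rfl
      | succ k ih =>
        intro a ha
        rw [PySem.List.pyRange_one_cons (by omega)]
        by_cases hp : lo ≤ a ∧ a ≤ hi
        · simp only [List.filter_cons]
          rw [if_pos (by simp [hp.1, hp.2])]
          rw [show max lo a = a by omega]
          rw [PySem.List.pyRange_one_cons (show a < min hi (b - 1) + 1 by omega)]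
          rw [ih (a+1) (by omega), show max lo (a+1) = a + 1 by omega]
        · simp only [List.filter_cons]
          rw [if_neg (by simp; omega), ih (a+1) (by omega)]
          by_cases hlo : a < lo
          · rw [show max lo (a+1) = max lo a by omega]
          · have hhi : hi < a := by omega
            rw [PySem.List.pyRange_one_eq_nil (by omega), PySem.List.pyRange_one_eq_nil (by omega)]
    exact key (b - a).toNat a (by omega)

theorem foldl_flatMap {α β γ : Type} (l : List α) (f : α → List β) (g : γ → β → γ) (init : γ) :
    (l.flatMap f).foldl g init = l.foldl (fun acc a => (f a).foldl g acc) init := by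
  induction l generalizing init with
  | nil => rfl
  | cons x t ih => simp [List.flatMap_cons, List.foldl_append, ih]
theorem count_pyRange_one (a b x : Int) :
    (PySem.List.pyRange a b 1).count x = if a ≤ x ∧ x < b then 1 else 0 := by
  by_cases hx : a ≤ x ∧ x < b
  · rw [if_pos hx]
    exact List.count_eq_one_of_mem (PySem.List.nodup_pyRange_one a b)
      ((PySem.List.mem_pyRange_one).mpr hx)
  · rw [if_neg hx]
    exact List.count_eq_zero_of_not_mem (fun hm => hx ((PySem.List.mem_pyRange_one).mp hm))
theorem count_flatMap {α β : Type} [BEq β] (l : List α) (f : α → List β) (b : β) :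
    (l.flatMap f).count b = (l.map (fun a => (f a).count b)).sum := by
  induction l with
  | nil => rfl
  | cons x t ih => simp [List.flatMap_cons, List.count_append, ih]
theorem sum_map_ite_eq (l : List Int) (i : Int) (k : Nat) :
    (l.map (fun r => if r = i then k else 0)).sum = k * l.count i := by
  induction l with
  | nil => simp
  | cons x t ih =>
    simp only [List.map_cons, List.sum_cons, ih, List.count_cons]
    by_cases hx : x = i
    · subst hx; simp; ring
    · simp [hx]
theorem cells_count (w : Int × Int) (i j : Int) :
    (cells w).count (i, j) = if covB w i j then 1 else 0 := by
  unfold cells covB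
  rw [count_flatMap]
  have hinner : ∀ r : Int, (((PySem.List.pyRange w.2 (w.2+3) 1).map (fun c => (r, c))).count (i, j))
      = if r = i then (PySem.List.pyRange w.2 (w.2+3) 1).count j else 0 := by
    intro r
    induction (PySem.List.pyRange w.2 (w.2+3) 1) with
    | nil => simp
    | cons c t ih =>
      simp only [List.map_cons, List.count_cons, ih]
      by_cases hr : r = i <;> by_cases hc : c = j <;>
        simp [hr, hc, Prod.ext_iff] <;> omega
  rw [List.map_congr_left (fun a (_ : a ∈ PySem.List.pyRange w.1 (w.1+3) 1) => hinner a)]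
  rw [sum_map_ite_eq, count_pyRange_one, count_pyRange_one]
  simp only [Bool.and_eq_true, decide_eq_true_eq]
  split_ifs <;> omega

theorem valid_eq (image : List (List Int)) (threshold : Int) (i j : Int) :
    ((PySem.List.pyRange i (i+3) 1).all (fun r =>
        (PySem.List.pyRange j (j+2) 1).all (fun c =>
          decide (|gAt image r c - gAt image r (c+1)| ≤ threshold))) &&
     (PySem.List.pyRange j (j+3) 1).all (fun c =>
        (PySem.List.pyRange i (i+2) 1).all (fun r =>
          decide (|gAt image r c - gAt image (r+1) c| ≤ threshold))))
    = bValid image threshold i j := by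
  rw [Bool.eq_iff_iff]
  simp only [bValid, Bool.and_eq_true, List.all_eq_true, List.mem_flatMap, List.mem_map,
    PySem.List.mem_pyRange_one]
  constructor
  · rintro ⟨h1, h2⟩
    refine ⟨?_, ?_⟩ <;> rintro ⟨r, c⟩ ⟨r', hr', c', hc', heq⟩ <;>
      injection heq with e1 e2 <;> subst e1 <;> subst e2
    · exact h1 r' hr' c' hc'
    · exact h2 c' hc' r' hr'
  · rintro ⟨h1, h2⟩
    refine ⟨?_, ?_⟩
    · intro r hr c hc; exact h1 (r, c) ⟨r, hr, c, hc, rfl⟩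
    · intro c hc r hr; exact h2 (r, c) ⟨r, hr, c, hc, rfl⟩
theorem aStep_eq (image : List (List Int)) (threshold : Int)
    (st : List (List Int) × List (List Int)) (w : Int × Int) :
    aStep image threshold st w =
      if bValid image threshold w.1 w.2 then
        (cells w).foldl (updCell (bAvg image w.1 w.2)) st
      else st := by
  obtain ⟨i, j⟩ := w
  simp only [aStep, valid_eq]
  by_cases hb : bValid image threshold i j
  · simp only [hb, if_true]
    have havg : PySem.Int.floordiv ((PySem.List.pyRange i (i+3) 1).foldl (fun acc r =>
        (PySem.List.pyRange j (j+3) 1).foldl (fun acc c => acc + gAt image r c) acc) 0) 9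
        = bAvg image i j := by
      rw [bAvg, foldl_flatMap]
      simp only [List.foldl_map]
    rw [havg, cells, foldl_flatMap]
    simp only [List.foldl_map, updCell]
  · simp [hb]
theorem getD_set {α : Type} (xs : List α) (n : Nat) (v : α) (i : Nat) (d : α) :
    (xs.set n v).getD i d = if n = i ∧ n < xs.length then v else xs.getD i d := by
  simp [List.getD_eq_getElem?_getD, List.getElem?_set]
  split_ifs with h1 h2 h3 <;> simp_all <;> omega
theorem pyGetD_nonneg {α : Type} (xs : List α) (i : Int) (d : α) (h : 0 ≤ i) :
    PySem.List.pyGetD xs i d = xs.getD i.toNat d := by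
  rw [PySem.List.pyGetD_of_nonneg] <;> simp [h]
theorem pySetD_nonneg {α : Type} (xs : List α) (i : Int) (v : α) (h : 0 ≤ i) :
    PySem.List.pySetD xs i v = xs.set i.toNat v := PySem.List.pySetD_of_nonneg xs v h
theorem getD_mem {α : Type} (l : List α) (n : Nat) (d : α) (h : n < l.length) :
    l.getD n d ∈ l := by
  rw [List.getD_eq_getElem?_getD, List.getElem?_eq_getElem h]
  exact List.getElem_mem _
theorem gAt_mset (g : List (List Int)) (r c i j v : Int) (hr : 0 ≤ r) (hc : 0 ≤ c)
    (hi : 0 ≤ i) (hj : 0 ≤ j)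
    (hrm : r.toNat < g.length) (hcn : c.toNat < (g.getD r.toNat []).length) :
    gAt (mset g r c v) i j = if i = r ∧ j = c then v else gAt g i j := by
  unfold gAt mset
  rw [pySetD_nonneg _ _ _ hr, pySetD_nonneg _ _ _ hc]
  simp only [pyGetD_nonneg _ _ _ hi, pyGetD_nonneg _ _ _ hj, pyGetD_nonneg _ _ _ hr]
  rw [getD_set]
  by_cases hir : i = r
  · subst hir
    rw [if_pos ⟨rfl, hrm⟩, getD_set]
    by_cases hjc : j = c
    · subst hjc
      rw [if_pos ⟨rfl, hcn⟩, if_pos ⟨rfl, rfl⟩]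
    · rw [if_neg (fun hh => hjc (by omega)), if_neg (fun hh => hjc hh.2)]
  · rw [if_neg (fun hh => hir (by omega)), if_neg (fun hh => hir hh.1)]
theorem shape_mset (M N : Nat) (g : List (List Int)) (r c v : Int) (hr : 0 ≤ r) (hc : 0 ≤ c)
    (hrm : r.toNat < g.length) (h : Shape M N g) : Shape M N (mset g r c v) := by
  obtain ⟨h1, h2⟩ := h
  unfold mset
  rw [pySetD_nonneg _ _ _ hr, pySetD_nonneg _ _ _ hc]
  constructor
  · simpa using h1
  · intro row hrow
    rcases List.mem_or_eq_of_mem_set hrow with hmem | heq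
    · exact h2 _ hmem
    · subst heq
      simp only [List.length_set]
      rw [pyGetD_nonneg _ _ _ hr]
      exact h2 _ (getD_mem _ _ _ hrm)
theorem updFold_spec (M N : Nat) (avg : Int) (L : List (Int × Int))
    (hb : ∀ rc ∈ L, 0 ≤ rc.1 ∧ rc.1.toNat < M ∧ 0 ≤ rc.2 ∧ rc.2.toNat < N) :
    ∀ st : List (List Int) × List (List Int), Shape M N st.1 → Shape M N st.2 →
    ∀ i j : Int, 0 ≤ i → 0 ≤ j →
      Shape M N (L.foldl (updCell avg) st).1 ∧ Shape M N (L.foldl (updCell avg) st).2 ∧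
      gAt (L.foldl (updCell avg) st).1 i j = gAt st.1 i j + avg * (L.count (i, j) : Int) ∧
      gAt (L.foldl (updCell avg) st).2 i j = gAt st.2 i j + (L.count (i, j) : Int) := by
  induction L with
  | nil => intro st h1 h2 i j hi hj; simp [h1, h2]
  | cons rc t ih =>
    rintro st h1 h2 i j hi hj
    obtain ⟨a, b⟩ := rc
    obtain ⟨ha1, haM, hb1, hbN⟩ := hb (a, b) (List.mem_cons_self ..)
    have hb' : ∀ x ∈ t, 0 ≤ x.1 ∧ x.1.toNat < M ∧ 0 ≤ x.2 ∧ x.2.toNat < N :=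
      fun x hx => hb x (List.mem_cons_of_mem _ hx)
    have hrm1 : a.toNat < st.1.length := by rw [h1.1]; exact haM
    have hrm2 : a.toNat < st.2.length := by rw [h2.1]; exact haM
    have hcn1 : b.toNat < (st.1.getD a.toNat []).length := by
      rw [h1.2 _ (getD_mem _ _ _ hrm1)]; exact hbN
    have hcn2 : b.toNat < (st.2.getD a.toNat []).length := by
      rw [h2.2 _ (getD_mem _ _ _ hrm2)]; exact hbN
    have hs1 : Shape M N (updCell avg st (a, b)).1 := shape_mset _ _ _ _ _ _ ha1 hb1 hrm1 h1
    have hs2 : Shape M N (updCell avg st (a, b)).2 := shape_mset _ _ _ _ _ _ ha1 hb1 hrm2 h2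
    obtain ⟨k1, k2, k3, k4⟩ := ih hb' (updCell avg st (a, b)) hs1 hs2 i j hi hj
    refine ⟨k1, k2, ?_, ?_⟩
    · rw [List.foldl_cons, k3,
        show (updCell avg st (a, b)).1 = mset st.1 a b (gAt st.1 a b + avg) from rfl,
        gAt_mset _ _ _ _ _ _ ha1 hb1 hi hj hrm1 hcn1, List.count_cons]
      by_cases hx : i = a ∧ j = b
      · obtain ⟨e1, e2⟩ := hx; subst e1; subst e2
        rw [if_pos ⟨rfl, rfl⟩, if_pos (by simp)]
        push_cast; ring
      · rw [if_neg hx, if_neg (by simp only [beq_iff_eq, Prod.mk.injEq]; exact fun hh => hx ⟨hh.1.symm, hh.2.symm⟩)]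
        push_cast; ring
    · rw [List.foldl_cons, k4,
        show (updCell avg st (a, b)).2 = mset st.2 a b (gAt st.2 a b + 1) from rfl,
        gAt_mset _ _ _ _ _ _ ha1 hb1 hi hj hrm2 hcn2, List.count_cons]
      by_cases hx : i = a ∧ j = b
      · obtain ⟨e1, e2⟩ := hx; subst e1; subst e2
        rw [if_pos ⟨rfl, rfl⟩, if_pos (by simp)]
        push_cast; ring
      · rw [if_neg hx, if_neg (by simp only [beq_iff_eq, Prod.mk.injEq]; exact fun hh => hx ⟨hh.1.symm, hh.2.symm⟩)]
        push_cast; ring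
theorem scatter_spec (image : List (List Int)) (threshold : Int) (M N : Nat)
    (W : List (Int × Int))
    (hw : ∀ w ∈ W, 0 ≤ w.1 ∧ w.1 + 3 ≤ (M : Int) ∧ 0 ≤ w.2 ∧ w.2 + 3 ≤ (N : Int)) :
    ∀ st : List (List Int) × List (List Int), Shape M N st.1 → Shape M N st.2 →
    ∀ i j : Int, 0 ≤ i → 0 ≤ j →
      Shape M N (W.foldl (aStep image threshold) st).1 ∧
      Shape M N (W.foldl (aStep image threshold) st).2 ∧
      gAt (W.foldl (aStep image threshold) st).1 i j
        = gAt st.1 i j + (covL image threshold W i j).sum ∧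
      gAt (W.foldl (aStep image threshold) st).2 i j
        = gAt st.2 i j + ((covL image threshold W i j).length : Int) := by
  induction W with
  | nil => intro st h1 h2 i j hi hj; refine ⟨h1, h2, ?_, ?_⟩ <;> simp [covL]
  | cons w t ih =>
    intro st h1 h2 i j hi hj
    obtain ⟨hw1, hwM, hw2, hwN⟩ := hw w (List.mem_cons_self ..)
    have hw' : ∀ x ∈ t, 0 ≤ x.1 ∧ x.1 + 3 ≤ (M : Int) ∧ 0 ≤ x.2 ∧ x.2 + 3 ≤ (N : Int) :=
      fun x hx => hw x (List.mem_cons_of_mem _ hx)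
    rw [List.foldl_cons, aStep_eq]
    by_cases hv : bValid image threshold w.1 w.2
    · rw [if_pos hv]
      have hcell : ∀ rc ∈ cells w, 0 ≤ rc.1 ∧ rc.1.toNat < M ∧ 0 ≤ rc.2 ∧ rc.2.toNat < N := by
        rintro ⟨r, c⟩ hm
        simp only [cells, List.mem_flatMap, List.mem_map, PySem.List.mem_pyRange_one] at hm
        obtain ⟨r', hr', c', hc', heq⟩ := hm
        injection heq with e1 e2; subst e1; subst e2
        refine ⟨by omega, by omega, by omega, by omega⟩
      obtain ⟨u1, u2, u3, u4⟩ :=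
        updFold_spec M N (bAvg image w.1 w.2) (cells w) hcell st h1 h2 i j hi hj
      obtain ⟨k1, k2, k3, k4⟩ :=
        ih hw' ((cells w).foldl (updCell (bAvg image w.1 w.2)) st) u1 u2 i j hi hj
      have hcov : covL image threshold (w :: t) i j =
          (if covB w i j then [bAvg image w.1 w.2] else []) ++ covL image threshold t i j := by
        unfold covL
        rw [List.filter_cons]
        by_cases hcb : covB w i j
        · rw [if_pos (by simp [hv, hcb]), if_pos hcb]; simp
        · rw [if_neg (by simp [hv, hcb]), if_neg hcb]; simp
      refine ⟨k1, k2, ?_, ?_⟩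
      · rw [k3, u3, cells_count, hcov]
        by_cases hcb : covB w i j <;> simp [hcb] <;> ring
      · rw [k4, u4, cells_count, hcov]
        by_cases hcb : covB w i j <;> simp [hcb] <;> ring
    · rw [if_neg hv]
      obtain ⟨k1, k2, k3, k4⟩ := ih hw' st h1 h2 i j hi hj
      have hcov : covL image threshold (w :: t) i j = covL image threshold t i j := by
        unfold covL
        rw [List.filter_cons, if_neg (by simp [hv])]
      rw [hcov]
      exact ⟨k1, k2, k3, k4⟩

theorem map_flatMap' {α β γ : Type} (l : List α) (f : α → List β) (g : β → γ) :
    (l.flatMap f).map g = l.flatMap (fun a => (f a).map g) := by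
  induction l with
  | nil => rfl
  | cons x t ih => simp [List.flatMap_cons, ih]

theorem flatMap_congr_mem {α β : Type} (l : List α) (f g : α → List β)
    (h : ∀ a ∈ l, f a = g a) : l.flatMap f = l.flatMap g := by
  induction l with
  | nil => rfl
  | cons x t ih =>
    simp only [List.flatMap_cons]
    rw [h x (List.mem_cons_self ..), ih (fun a ha => h a (List.mem_cons_of_mem _ ha))]

theorem flatMap_filter_nil {α β : Type} (l : List α) (g : α → List β) (p : α → Bool)
    (h : ∀ a ∈ l, p a = false → g a = []) : l.flatMap g = (l.filter p).flatMap g := by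
  induction l with
  | nil => rfl
  | cons x t ih =>
    have ih' := ih (fun a ha => h a (List.mem_cons_of_mem _ ha))
    by_cases hp : p x
    · simp [List.filter_cons, hp, List.flatMap_cons, ih']
    · rw [List.flatMap_cons, h x (List.mem_cons_self ..) (by simpa using hp)]
      simp [List.filter_cons, hp, ih']

theorem cov_eq (image : List (List Int)) (threshold : Int) (m n i j : Int)
    (hi0 : 0 ≤ i) (him : i < m) (hj0 : 0 ≤ j) (hjn : j < n) :
    (PySem.List.pyRange (max (i - 2) 0) (min i (m - 3) + 1) 1).flatMap (fun wi =>
        ((PySem.List.pyRange (max (j - 2) 0) (min j (n - 3) + 1) 1).filter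
            (fun wj => bValid image threshold wi wj)).map
          (fun wj => bAvg image wi wj))
      = covL image threshold
          ((PySem.List.pyRange 0 (m - 2) 1).flatMap (fun a =>
            (PySem.List.pyRange 0 (n - 2) 1).map (fun b => (a, b)))) i j := by
  symm
  unfold covL
  rw [filter_flatMap, map_flatMap']
  have hinner : ∀ a : Int,
      ((((PySem.List.pyRange 0 (n - 2) 1).map (fun b => (a, b))).filter
          (fun w => bValid image threshold w.1 w.2 && covB w i j)).map
        (fun w => bAvg image w.1 w.2))
      = ((PySem.List.pyRange 0 (n - 2) 1).filter
          (fun b => bValid image threshold a b && covB (a, b) i j)).map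
        (fun b => bAvg image a b) := by
    intro a
    rw [List.filter_map, List.map_map]
    rfl
  rw [flatMap_congr_mem _ _ _ (fun a _ => hinner a)]
  rw [flatMap_filter_nil _ _ (fun a => decide (i - 2 ≤ a) && decide (a ≤ i))
    (by
      intro a _ hfalse
      rw [List.map_eq_nil_iff, List.filter_eq_nil_iff]
      intro b _ hcontra
      simp only [covB, Bool.and_eq_true, decide_eq_true_eq] at hcontra
      have hna : ¬ (i - 2 ≤ a ∧ a ≤ i) := by simpa using hfalse
      obtain ⟨-, hc⟩ := hcontra
      exact hna ⟨by omega, by omega⟩)]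
  rw [pyRange_filter_band, show m - 2 - 1 = m - 3 by ring]
  apply flatMap_congr_mem
  intro a ha
  have hmem := (PySem.List.mem_pyRange_one).mp ha
  have hband : (PySem.List.pyRange 0 (n - 2) 1).filter
      (fun b => bValid image threshold a b && covB (a, b) i j)
      = ((PySem.List.pyRange 0 (n - 2) 1).filter
          (fun b => decide (j - 2 ≤ b) && decide (b ≤ j))).filter
        (fun b => bValid image threshold a b) := by
    rw [List.filter_filter]
    apply List.filter_congr
    intro b _
    cases hbv : bValid image threshold a b
    · simp
    · simp only [covB, Bool.true_and]
      rw [Bool.eq_iff_iff]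
      simp only [Bool.and_eq_true, decide_eq_true_eq]
      constructor
      · intro hh; omega
      · intro hh; omega
  rw [hband, pyRange_filter_band, show n - 2 - 1 = n - 3 by ring]

theorem shape_zeros (M N : Nat) :
    Shape M N (List.replicate M (List.replicate N (0 : Int))) := by
  constructor
  · simp
  · intro row hrow
    rw [List.eq_of_mem_replicate hrow]
    simp

theorem gAt_zeros (M N : Nat) (i j : Int) (hi : 0 ≤ i) (hj : 0 ≤ j) :
    gAt (List.replicate M (List.replicate N (0 : Int))) i j = 0 := by
  unfold gAt
  rw [pyGetD_nonneg _ _ _ hi, pyGetD_nonneg _ _ _ hj]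
  by_cases h : i.toNat < M <;> by_cases h2 : j.toNat < N <;>
    simp [List.getD_eq_getElem?_getD, List.getElem?_replicate, h, h2]

theorem foldl_add_init (l : List Int) (a : Int) : l.foldl (· + ·) a = a + l.sum := by
  induction l generalizing a with
  | nil => simp
  | cons x t ih => simp [ih]; ring

-- ===== VERDICT (by name: the statement is the Claim_ definition above) =====
theorem resultGrid_spec : Claim_equal_resultGrid := by
  intro image threshold _ hpre
  obtain ⟨hne, hrows⟩ := hpre
  unfold Spec_resultGrid
  cases image with
  | nil => exact absurd rfl hne
  | cons r0 rest =>
    have hmI : PySem.List.len (r0 :: rest) = (((r0 :: rest).length : Nat) : Int) := by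
      simp [PySem.List.len_eq]
    have hnI : PySem.List.len (PySem.List.pyGetD (r0 :: rest) 0 []) = ((r0.length : Nat) : Int) := by
      rw [PySem.List.pyGetD_zero_cons]
      simp [PySem.List.len_eq]
    simp only [resultGrid, resultGrid_alt, hmI, hnI, Int.toNat_natCast]
    apply List.map_congr_left
    intro i hi
    apply List.map_congr_left
    intro j hj
    obtain ⟨hi0, hiM⟩ := (PySem.List.mem_pyRange_one).mp hi
    obtain ⟨hj0, hjN⟩ := (PySem.List.mem_pyRange_one).mp hj
    have hfold : ∀ (m2 n2 : Int) (z : List (List Int) × List (List Int)),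
        (PySem.List.pyRange 0 m2 1).foldl (fun st i =>
          (PySem.List.pyRange 0 n2 1).foldl (fun st j =>
            aStep (r0 :: rest) threshold st (i, j)) st) z
        = ((PySem.List.pyRange 0 m2 1).flatMap (fun a =>
            (PySem.List.pyRange 0 n2 1).map (fun b => (a, b)))).foldl
            (aStep (r0 :: rest) threshold) z := by
      intro m2 n2 z
      rw [foldl_flatMap]
      simp only [List.foldl_map]
    rw [hfold]
    have hw : ∀ w ∈ ((PySem.List.pyRange 0 ((((r0 :: rest).length : Nat) : Int) - 2) 1).flatMap (fun a =>
        (PySem.List.pyRange 0 (((r0.length : Nat) : Int) - 2) 1).map (fun b => (a, b)))), 0 ≤ w.1 ∧ w.1 + 3 ≤ (((r0 :: rest).length : Nat) : Int) ∧ 0 ≤ w.2 ∧ w.2 + 3 ≤ ((r0.length : Nat) : Int) := by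
      rintro ⟨a, b⟩ hm
      simp only [List.mem_flatMap, List.mem_map, PySem.List.mem_pyRange_one] at hm
      obtain ⟨a', ha', b', hb', heq⟩ := hm
      injection heq with e1 e2; subst e1; subst e2
      refine ⟨by omega, by omega, by omega, by omega⟩
    obtain ⟨-, -, hs1, hs2⟩ := scatter_spec (r0 :: rest) threshold (r0 :: rest).length r0.length
      ((PySem.List.pyRange 0 ((((r0 :: rest).length : Nat) : Int) - 2) 1).flatMap (fun a =>
        (PySem.List.pyRange 0 (((r0.length : Nat) : Int) - 2) 1).map (fun b => (a, b)))) hw ((List.replicate (r0 :: rest).length (List.replicate r0.length (0 : Int))), (List.replicate (r0 :: rest).length (List.replicate r0.length (0 : Int)))) (shape_zeros _ _) (shape_zeros _ _) i j hi0 hj0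
    simp only [gAt_zeros _ _ i j hi0 hj0, zero_add] at hs1 hs2
    rw [hs1, hs2, cov_eq (r0 :: rest) threshold _ _ i j hi0 hiM hj0 hjN]
    cases hcov : covL (r0 :: rest) threshold
        ((PySem.List.pyRange 0 ((((r0 :: rest).length : Nat) : Int) - 2) 1).flatMap (fun a =>
          (PySem.List.pyRange 0 (((r0.length : Nat) : Int) - 2) 1).map (fun b => (a, b)))) i j with
    | nil => simp
    | cons x t =>
      simp [PySem.List.len_eq]
      rw [if_neg (by omega), foldl_add_init]
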